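-- pv_equiv track=rewrite | github.com/langlangps/kemiskinan-indonesia | home/dash_app/finished_app/LineChart.py | get_pulau
-- ===== SOURCE A (Python) =====
-- sumatera = ('Sumatera Utara', 'Aceh', 'Lampung', 'Riau', 'Sumatera Selatan', 'Kep. Riau', 'Sumatera Barat', 'Jambi', 'Bengkulu', 'Kep. Bangka Belitung')
--
-- jawa_bali_nusa = ('DKI Jakarta', 'DI Yogyakarta', 'Banten', 'Jawa Tengah', 'Nusa Tenggara Timur','Nusa Tenggara Barat', 'Jawa Barat', 'Jawa Timur', 'Bali')
--
-- sulawesi = ('Sulawesi Tenggara', 'Gorontalo', 'Sulawesi Barat', 'Sulawesi Selatan', 'Sulawesi Utara', 'Sulawesi Tengah')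
--
-- papua_maluku = ('Maluku', 'Papua', 'Maluku Utara', 'Papua Barat')
--
-- kalimantan = ('Kalimantan Selatan', 'Kalimantan Tengah', 'Kalimantan Barat', 'Kalimantan Timur', 'Kalimantan Utara')
--
-- def get_pulau(provinsi):
--   if provinsi in [a.upper() for a in sumatera]:
--     return 'Sumatera'
--   elif provinsi in [a.upper() for a in jawa_bali_nusa]:
--     return 'Jawa, Bali dan Nusa Tenggara'
--   elif provinsi in [a.upper() for a in sulawesi]:
--     return 'Sulawesi'
--   elif provinsi in [a.upper() for a in papua_maluku]:
--     return 'Papua dan Maluku'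
--   elif provinsi in [a.upper() for a in kalimantan]:
--     return 'Kalimantan'
--   else:
--     return 'Tidak masuk'
-- ===== SOURCE B (Python) =====
-- sumatera = ('Sumatera Utara', 'Aceh', 'Lampung', 'Riau', 'Sumatera Selatan', 'Kep. Riau', 'Sumatera Barat', 'Jambi', 'Bengkulu', 'Kep. Bangka Belitung')
--
-- jawa_bali_nusa = ('DKI Jakarta', 'DI Yogyakarta', 'Banten', 'Jawa Tengah', 'Nusa Tenggara Timur','Nusa Tenggara Barat', 'Jawa Barat', 'Jawa Timur', 'Bali')
--
-- sulawesi = ('Sulawesi Tenggara', 'Gorontalo', 'Sulawesi Barat', 'Sulawesi Selatan', 'Sulawesi Utara', 'Sulawesi Tengah')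
--
-- papua_maluku = ('Maluku', 'Papua', 'Maluku Utara', 'Papua Barat')
--
-- kalimantan = ('Kalimantan Selatan', 'Kalimantan Tengah', 'Kalimantan Barat', 'Kalimantan Timur', 'Kalimantan Utara')
--
-- _GROUPS = (
--     (sumatera, 'Sumatera'),
--     (jawa_bali_nusa, 'Jawa, Bali dan Nusa Tenggara'),
--     (sulawesi, 'Sulawesi'),
--     (papua_maluku, 'Papua dan Maluku'),
--     (kalimantan, 'Kalimantan'),
-- )
--
-- # Two-level dispatch (a one-character-deep trie on the first word): the first
-- # word of every uppercased province name determines its island group uniquely,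
-- # so we index the groups by that first word and only then confirm the full name
-- # inside the single candidate group.
-- def _first_word(s):
--     w = []
--     for ch in s:
--         if ch == ' ':
--             break
--         w.append(ch)
--     return ''.join(w)
--
-- _BY_FIRST_WORD = {}
-- for _provs, _label in _GROUPS:
--     _members = tuple(p.upper() for p in _provs)
--     for _m in _members:
--         _BY_FIRST_WORD[_first_word(_m)] = (_members, _label)
--
-- def get_pulau(provinsi):
--     entry = _BY_FIRST_WORD.get(_first_word(provinsi))
--     if entry is not None and provinsi in entry[0]:
--         return entry[1]
--     return 'Tidak masuk'
-- ===== Notes on version B (the rewrite author's own statement) =====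
-- stated objective: alternative
-- what changed: Replaces the five per-call uppercased-list rebuilds and sequential membership scans with a two-level dispatch: a table built once at module load keyed by the FIRST WORD of each uppercased province name selects the single candidate island group, and only that group is then checked for the full name.
import Mathlib
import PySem

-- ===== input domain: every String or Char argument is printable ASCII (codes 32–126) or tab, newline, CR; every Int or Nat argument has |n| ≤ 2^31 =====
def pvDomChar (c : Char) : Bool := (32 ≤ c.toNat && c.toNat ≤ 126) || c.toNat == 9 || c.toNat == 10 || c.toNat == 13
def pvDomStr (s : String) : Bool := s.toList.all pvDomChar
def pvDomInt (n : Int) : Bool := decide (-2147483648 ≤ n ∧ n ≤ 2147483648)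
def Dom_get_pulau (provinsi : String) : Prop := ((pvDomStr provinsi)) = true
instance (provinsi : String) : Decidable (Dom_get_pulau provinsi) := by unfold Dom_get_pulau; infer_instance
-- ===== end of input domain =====

-- B replaces the five sequential membership scans with a two-level dispatch: a table keyed
-- by the FIRST WORD of the (uppercased) name picks the single candidate group, then the full
-- name is confirmed inside only that group (objective: alternative decomposition).

-- ===== PORT A =====
def sumatera : List String := ["Sumatera Utara", "Aceh", "Lampung", "Riau", "Sumatera Selatan", "Kep. Riau", "Sumatera Barat", "Jambi", "Bengkulu", "Kep. Bangka Belitung"]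
def jawa_bali_nusa : List String := ["DKI Jakarta", "DI Yogyakarta", "Banten", "Jawa Tengah", "Nusa Tenggara Timur", "Nusa Tenggara Barat", "Jawa Barat", "Jawa Timur", "Bali"]
def sulawesi : List String := ["Sulawesi Tenggara", "Gorontalo", "Sulawesi Barat", "Sulawesi Selatan", "Sulawesi Utara", "Sulawesi Tengah"]
def papua_maluku : List String := ["Maluku", "Papua", "Maluku Utara", "Papua Barat"]
def kalimantan : List String := ["Kalimantan Selatan", "Kalimantan Tengah", "Kalimantan Barat", "Kalimantan Timur", "Kalimantan Utara"]

def get_pulau (provinsi : String) : String :=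
  if (sumatera.map PySem.Str.upper).contains provinsi then "Sumatera"
  else if (jawa_bali_nusa.map PySem.Str.upper).contains provinsi then "Jawa, Bali dan Nusa Tenggara"
  else if (sulawesi.map PySem.Str.upper).contains provinsi then "Sulawesi"
  else if (papua_maluku.map PySem.Str.upper).contains provinsi then "Papua dan Maluku"
  else if (kalimantan.map PySem.Str.upper).contains provinsi then "Kalimantan"
  else "Tidak masuk"

-- ===== PORT B =====
def pulauGroups : List (List String × String) :=
  [(sumatera, "Sumatera"),
   (jawa_bali_nusa, "Jawa, Bali dan Nusa Tenggara"),
   (sulawesi, "Sulawesi"),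
   (papua_maluku, "Papua dan Maluku"),
   (kalimantan, "Kalimantan")]

-- _first_word: the explicit char loop with break (collects chars until the first space)
def firstWordChars : List Char → List Char
  | [] => []
  | ch :: rest => if ch == ' ' then [] else ch :: firstWordChars rest

def firstWord (s : String) : String := String.ofList (firstWordChars s.toList)

-- _BY_FIRST_WORD: the module-load loop over the five groups
def byFirstWord : PySem.Dict String (List String × String) :=
  pulauGroups.foldl
    (fun d gl =>
      let members := gl.1.map PySem.Str.upper
      members.foldl (fun d m => d.insert (firstWord m) (members, gl.2)) d)
    PySem.Dict.empty

def get_pulau_alt (provinsi : String) : String :=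
  match byFirstWord.get? (firstWord provinsi) with
  | some entry => if entry.1.contains provinsi then entry.2 else "Tidak masuk"
  | none => "Tidak masuk"

-- ===== PRECONDITION & SPEC =====
def Spec_get_pulau (provinsi : String) (out : String) : Prop := out = get_pulau_alt provinsi
instance (provinsi : String) (out : String) : Decidable (Spec_get_pulau provinsi out) := by unfold Spec_get_pulau; infer_instance

-- ===== CLAIM (what is proved, stated in full; the proofs are below) =====
def Claim_equal_get_pulau : Prop := ∀ (provinsi : String), Dom_get_pulau provinsi → Spec_get_pulau provinsi (get_pulau provinsi)

-- ===== LEMMAS AND PROOFS =====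

def sumU : List String := ["SUMATERA UTARA", "ACEH", "LAMPUNG", "RIAU", "SUMATERA SELATAN", "KEP. RIAU", "SUMATERA BARAT", "JAMBI", "BENGKULU", "KEP. BANGKA BELITUNG"]
def jawU : List String := ["DKI JAKARTA", "DI YOGYAKARTA", "BANTEN", "JAWA TENGAH", "NUSA TENGGARA TIMUR", "NUSA TENGGARA BARAT", "JAWA BARAT", "JAWA TIMUR", "BALI"]
def sulU : List String := ["SULAWESI TENGGARA", "GORONTALO", "SULAWESI BARAT", "SULAWESI SELATAN", "SULAWESI UTARA", "SULAWESI TENGAH"]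
def papU : List String := ["MALUKU", "PAPUA", "MALUKU UTARA", "PAPUA BARAT"]
def kalU : List String := ["KALIMANTAN SELATAN", "KALIMANTAN TENGAH", "KALIMANTAN BARAT", "KALIMANTAN TIMUR", "KALIMANTAN UTARA"]

theorem up_sumU : sumatera.map PySem.Str.upper = sumU := by decide
theorem up_jawU : jawa_bali_nusa.map PySem.Str.upper = jawU := by decide
theorem up_sulU : sulawesi.map PySem.Str.upper = sulU := by decide
theorem up_papU : papua_maluku.map PySem.Str.upper = papU := by decide
theorem up_kalU : kalimantan.map PySem.Str.upper = kalU := by decide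

theorem fw0 : firstWord "SUMATERA UTARA" = "SUMATERA" := by decide
theorem fw1 : firstWord "ACEH" = "ACEH" := by decide
theorem fw2 : firstWord "LAMPUNG" = "LAMPUNG" := by decide
theorem fw3 : firstWord "RIAU" = "RIAU" := by decide
theorem fw4 : firstWord "SUMATERA SELATAN" = "SUMATERA" := by decide
theorem fw5 : firstWord "KEP. RIAU" = "KEP." := by decide
theorem fw6 : firstWord "SUMATERA BARAT" = "SUMATERA" := by decide
theorem fw7 : firstWord "JAMBI" = "JAMBI" := by decide
theorem fw8 : firstWord "BENGKULU" = "BENGKULU" := by decide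
theorem fw9 : firstWord "KEP. BANGKA BELITUNG" = "KEP." := by decide
theorem fw10 : firstWord "DKI JAKARTA" = "DKI" := by decide
theorem fw11 : firstWord "DI YOGYAKARTA" = "DI" := by decide
theorem fw12 : firstWord "BANTEN" = "BANTEN" := by decide
theorem fw13 : firstWord "JAWA TENGAH" = "JAWA" := by decide
theorem fw14 : firstWord "NUSA TENGGARA TIMUR" = "NUSA" := by decide
theorem fw15 : firstWord "NUSA TENGGARA BARAT" = "NUSA" := by decide
theorem fw16 : firstWord "JAWA BARAT" = "JAWA" := by decide
theorem fw17 : firstWord "JAWA TIMUR" = "JAWA" := by decide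
theorem fw18 : firstWord "BALI" = "BALI" := by decide
theorem fw19 : firstWord "SULAWESI TENGGARA" = "SULAWESI" := by decide
theorem fw20 : firstWord "GORONTALO" = "GORONTALO" := by decide
theorem fw21 : firstWord "SULAWESI BARAT" = "SULAWESI" := by decide
theorem fw22 : firstWord "SULAWESI SELATAN" = "SULAWESI" := by decide
theorem fw23 : firstWord "SULAWESI UTARA" = "SULAWESI" := by decide
theorem fw24 : firstWord "SULAWESI TENGAH" = "SULAWESI" := by decide
theorem fw25 : firstWord "MALUKU" = "MALUKU" := by decide
theorem fw26 : firstWord "PAPUA" = "PAPUA" := by decide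
theorem fw27 : firstWord "MALUKU UTARA" = "MALUKU" := by decide
theorem fw28 : firstWord "PAPUA BARAT" = "PAPUA" := by decide
theorem fw29 : firstWord "KALIMANTAN SELATAN" = "KALIMANTAN" := by decide
theorem fw30 : firstWord "KALIMANTAN TENGAH" = "KALIMANTAN" := by decide
theorem fw31 : firstWord "KALIMANTAN BARAT" = "KALIMANTAN" := by decide
theorem fw32 : firstWord "KALIMANTAN TIMUR" = "KALIMANTAN" := by decide
theorem fw33 : firstWord "KALIMANTAN UTARA" = "KALIMANTAN" := by decide

theorem byFirstWord_unfold :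
    byFirstWord = ((((((((((((((((((((((((((((((((((PySem.Dict.empty.insert "SUMATERA" (sumU, "Sumatera")).insert "ACEH" (sumU, "Sumatera")).insert "LAMPUNG" (sumU, "Sumatera")).insert "RIAU" (sumU, "Sumatera")).insert "SUMATERA" (sumU, "Sumatera")).insert "KEP." (sumU, "Sumatera")).insert "SUMATERA" (sumU, "Sumatera")).insert "JAMBI" (sumU, "Sumatera")).insert "BENGKULU" (sumU, "Sumatera")).insert "KEP." (sumU, "Sumatera")).insert "DKI" (jawU, "Jawa, Bali dan Nusa Tenggara")).insert "DI" (jawU, "Jawa, Bali dan Nusa Tenggara")).insert "BANTEN" (jawU, "Jawa, Bali dan Nusa Tenggara")).insert "JAWA" (jawU, "Jawa, Bali dan Nusa Tenggara")).insert "NUSA" (jawU, "Jawa, Bali dan Nusa Tenggara")).insert "NUSA" (jawU, "Jawa, Bali dan Nusa Tenggara")).insert "JAWA" (jawU, "Jawa, Bali dan Nusa Tenggara")).insert "JAWA" (jawU, "Jawa, Bali dan Nusa Tenggara")).insert "BALI" (jawU, "Jawa, Bali dan Nusa Tenggara")).insert "SULAWESI" (sulU, "Sulawesi")).insert "GORONTALO"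 (sulU, "Sulawesi")).insert "SULAWESI" (sulU, "Sulawesi")).insert "SULAWESI" (sulU, "Sulawesi")).insert "SULAWESI" (sulU, "Sulawesi")).insert "SULAWESI" (sulU, "Sulawesi")).insert "MALUKU" (papU, "Papua dan Maluku")).insert "PAPUA" (papU, "Papua dan Maluku")).insert "MALUKU" (papU, "Papua dan Maluku")).insert "PAPUA" (papU, "Papua dan Maluku")).insert "KALIMANTAN" (kalU, "Kalimantan")).insert "KALIMANTAN" (kalU, "Kalimantan")).insert "KALIMANTAN" (kalU, "Kalimantan")).insert "KALIMANTAN" (kalU, "Kalimantan")).insert "KALIMANTAN" (kalU, "Kalimantan")) := by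
  simp only [byFirstWord, pulauGroups, List.foldl, up_sumU, up_jawU, up_sulU, up_papU, up_kalU, sumU, jawU, sulU, papU, kalU, fw0, fw1, fw2, fw3, fw4, fw5, fw6, fw7, fw8, fw9, fw10, fw11, fw12, fw13, fw14, fw15, fw16, fw17, fw18, fw19, fw20, fw21, fw22, fw23, fw24, fw25, fw26, fw27, fw28, fw29, fw30, fw31, fw32, fw33]

theorem get_tok0 : byFirstWord.get? "SUMATERA" = some (sumU, "Sumatera") := by
  rw [byFirstWord_unfold]; simp [PySem.Dict.get?_insert]
theorem get_tok1 : byFirstWord.get? "ACEH" = some (sumU, "Sumatera") := by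
  rw [byFirstWord_unfold]; simp [PySem.Dict.get?_insert]
theorem get_tok2 : byFirstWord.get? "LAMPUNG" = some (sumU, "Sumatera") := by
  rw [byFirstWord_unfold]; simp [PySem.Dict.get?_insert]
theorem get_tok3 : byFirstWord.get? "RIAU" = some (sumU, "Sumatera") := by
  rw [byFirstWord_unfold]; simp [PySem.Dict.get?_insert]
theorem get_tok4 : byFirstWord.get? "KEP." = some (sumU, "Sumatera") := by
  rw [byFirstWord_unfold]; simp [PySem.Dict.get?_insert]
theorem get_tok5 : byFirstWord.get? "JAMBI" = some (sumU, "Sumatera") := by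
  rw [byFirstWord_unfold]; simp [PySem.Dict.get?_insert]
theorem get_tok6 : byFirstWord.get? "BENGKULU" = some (sumU, "Sumatera") := by
  rw [byFirstWord_unfold]; simp [PySem.Dict.get?_insert]
theorem get_tok7 : byFirstWord.get? "DKI" = some (jawU, "Jawa, Bali dan Nusa Tenggara") := by
  rw [byFirstWord_unfold]; simp [PySem.Dict.get?_insert]
theorem get_tok8 : byFirstWord.get? "DI" = some (jawU, "Jawa, Bali dan Nusa Tenggara") := by
  rw [byFirstWord_unfold]; simp [PySem.Dict.get?_insert]
theorem get_tok9 : byFirstWord.get? "BANTEN" = some (jawU, "Jawa, Bali dan Nusa Tenggara") := by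
  rw [byFirstWord_unfold]; simp [PySem.Dict.get?_insert]
theorem get_tok10 : byFirstWord.get? "JAWA" = some (jawU, "Jawa, Bali dan Nusa Tenggara") := by
  rw [byFirstWord_unfold]; simp [PySem.Dict.get?_insert]
theorem get_tok11 : byFirstWord.get? "NUSA" = some (jawU, "Jawa, Bali dan Nusa Tenggara") := by
  rw [byFirstWord_unfold]; simp [PySem.Dict.get?_insert]
theorem get_tok12 : byFirstWord.get? "BALI" = some (jawU, "Jawa, Bali dan Nusa Tenggara") := by
  rw [byFirstWord_unfold]; simp [PySem.Dict.get?_insert]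
theorem get_tok13 : byFirstWord.get? "SULAWESI" = some (sulU, "Sulawesi") := by
  rw [byFirstWord_unfold]; simp [PySem.Dict.get?_insert]
theorem get_tok14 : byFirstWord.get? "GORONTALO" = some (sulU, "Sulawesi") := by
  rw [byFirstWord_unfold]; simp [PySem.Dict.get?_insert]
theorem get_tok15 : byFirstWord.get? "MALUKU" = some (papU, "Papua dan Maluku") := by
  rw [byFirstWord_unfold]; simp [PySem.Dict.get?_insert]
theorem get_tok16 : byFirstWord.get? "PAPUA" = some (papU, "Papua dan Maluku") := by
  rw [byFirstWord_unfold]; simp [PySem.Dict.get?_insert]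
theorem get_tok17 : byFirstWord.get? "KALIMANTAN" = some (kalU, "Kalimantan") := by
  rw [byFirstWord_unfold]; simp [PySem.Dict.get?_insert]

set_option maxRecDepth 100000 in
set_option maxHeartbeats 1000000 in
theorem get_pulau_spec : Claim_equal_get_pulau := by
  intro provinsi _
  unfold Spec_get_pulau
  by_cases h0 : provinsi = "SUMATERA UTARA"
  · subst h0; unfold get_pulau get_pulau_alt; simp only [up_sumU, up_jawU, up_sulU, up_papU, up_kalU]; rw [fw0, get_tok0]; decide
  by_cases h1 : provinsi = "ACEH"
  · subst h1; unfold get_pulau get_pulau_alt; simp only [up_sumU, up_jawU, up_sulU, up_papU, up_kalU]; rw [fw1, get_tok1]; decide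
  by_cases h2 : provinsi = "LAMPUNG"
  · subst h2; unfold get_pulau get_pulau_alt; simp only [up_sumU, up_jawU, up_sulU, up_papU, up_kalU]; rw [fw2, get_tok2]; decide
  by_cases h3 : provinsi = "RIAU"
  · subst h3; unfold get_pulau get_pulau_alt; simp only [up_sumU, up_jawU, up_sulU, up_papU, up_kalU]; rw [fw3, get_tok3]; decide
  by_cases h4 : provinsi = "SUMATERA SELATAN"
  · subst h4; unfold get_pulau get_pulau_alt; simp only [up_sumU, up_jawU, up_sulU, up_papU, up_kalU]; rw [fw4, get_tok0]; decide
  by_cases h5 : provinsi = "KEP. RIAU"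
  · subst h5; unfold get_pulau get_pulau_alt; simp only [up_sumU, up_jawU, up_sulU, up_papU, up_kalU]; rw [fw5, get_tok4]; decide
  by_cases h6 : provinsi = "SUMATERA BARAT"
  · subst h6; unfold get_pulau get_pulau_alt; simp only [up_sumU, up_jawU, up_sulU, up_papU, up_kalU]; rw [fw6, get_tok0]; decide
  by_cases h7 : provinsi = "JAMBI"
  · subst h7; unfold get_pulau get_pulau_alt; simp only [up_sumU, up_jawU, up_sulU, up_papU, up_kalU]; rw [fw7, get_tok5]; decide
  by_cases h8 : provinsi = "BENGKULU"
  · subst h8; unfold get_pulau get_pulau_alt; simp only [up_sumU, up_jawU, up_sulU, up_papU, up_kalU]; rw [fw8, get_tok6]; decide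
  by_cases h9 : provinsi = "KEP. BANGKA BELITUNG"
  · subst h9; unfold get_pulau get_pulau_alt; simp only [up_sumU, up_jawU, up_sulU, up_papU, up_kalU]; rw [fw9, get_tok4]; decide
  by_cases h10 : provinsi = "DKI JAKARTA"
  · subst h10; unfold get_pulau get_pulau_alt; simp only [up_sumU, up_jawU, up_sulU, up_papU, up_kalU]; rw [fw10, get_tok7]; decide
  by_cases h11 : provinsi = "DI YOGYAKARTA"
  · subst h11; unfold get_pulau get_pulau_alt; simp only [up_sumU, up_jawU, up_sulU, up_papU, up_kalU]; rw [fw11, get_tok8]; decide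
  by_cases h12 : provinsi = "BANTEN"
  · subst h12; unfold get_pulau get_pulau_alt; simp only [up_sumU, up_jawU, up_sulU, up_papU, up_kalU]; rw [fw12, get_tok9]; decide
  by_cases h13 : provinsi = "JAWA TENGAH"
  · subst h13; unfold get_pulau get_pulau_alt; simp only [up_sumU, up_jawU, up_sulU, up_papU, up_kalU]; rw [fw13, get_tok10]; decide
  by_cases h14 : provinsi = "NUSA TENGGARA TIMUR"
  · subst h14; unfold get_pulau get_pulau_alt; simp only [up_sumU, up_jawU, up_sulU, up_papU, up_kalU]; rw [fw14, get_tok11]; decide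
  by_cases h15 : provinsi = "NUSA TENGGARA BARAT"
  · subst h15; unfold get_pulau get_pulau_alt; simp only [up_sumU, up_jawU, up_sulU, up_papU, up_kalU]; rw [fw15, get_tok11]; decide
  by_cases h16 : provinsi = "JAWA BARAT"
  · subst h16; unfold get_pulau get_pulau_alt; simp only [up_sumU, up_jawU, up_sulU, up_papU, up_kalU]; rw [fw16, get_tok10]; decide
  by_cases h17 : provinsi = "JAWA TIMUR"
  · subst h17; unfold get_pulau get_pulau_alt; simp only [up_sumU, up_jawU, up_sulU, up_papU, up_kalU]; rw [fw17, get_tok10]; decide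
  by_cases h18 : provinsi = "BALI"
  · subst h18; unfold get_pulau get_pulau_alt; simp only [up_sumU, up_jawU, up_sulU, up_papU, up_kalU]; rw [fw18, get_tok12]; decide
  by_cases h19 : provinsi = "SULAWESI TENGGARA"
  · subst h19; unfold get_pulau get_pulau_alt; simp only [up_sumU, up_jawU, up_sulU, up_papU, up_kalU]; rw [fw19, get_tok13]; decide
  by_cases h20 : provinsi = "GORONTALO"
  · subst h20; unfold get_pulau get_pulau_alt; simp only [up_sumU, up_jawU, up_sulU, up_papU, up_kalU]; rw [fw20, get_tok14]; decide
  by_cases h21 : provinsi = "SULAWESI BARAT"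
  · subst h21; unfold get_pulau get_pulau_alt; simp only [up_sumU, up_jawU, up_sulU, up_papU, up_kalU]; rw [fw21, get_tok13]; decide
  by_cases h22 : provinsi = "SULAWESI SELATAN"
  · subst h22; unfold get_pulau get_pulau_alt; simp only [up_sumU, up_jawU, up_sulU, up_papU, up_kalU]; rw [fw22, get_tok13]; decide
  by_cases h23 : provinsi = "SULAWESI UTARA"
  · subst h23; unfold get_pulau get_pulau_alt; simp only [up_sumU, up_jawU, up_sulU, up_papU, up_kalU]; rw [fw23, get_tok13]; decide
  by_cases h24 : provinsi = "SULAWESI TENGAH"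
  · subst h24; unfold get_pulau get_pulau_alt; simp only [up_sumU, up_jawU, up_sulU, up_papU, up_kalU]; rw [fw24, get_tok13]; decide
  by_cases h25 : provinsi = "MALUKU"
  · subst h25; unfold get_pulau get_pulau_alt; simp only [up_sumU, up_jawU, up_sulU, up_papU, up_kalU]; rw [fw25, get_tok15]; decide
  by_cases h26 : provinsi = "PAPUA"
  · subst h26; unfold get_pulau get_pulau_alt; simp only [up_sumU, up_jawU, up_sulU, up_papU, up_kalU]; rw [fw26, get_tok16]; decide
  by_cases h27 : provinsi = "MALUKU UTARA"
  · subst h27; unfold get_pulau get_pulau_alt; simp only [up_sumU, up_jawU, up_sulU, up_papU, up_kalU]; rw [fw27, get_tok15]; decide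
  by_cases h28 : provinsi = "PAPUA BARAT"
  · subst h28; unfold get_pulau get_pulau_alt; simp only [up_sumU, up_jawU, up_sulU, up_papU, up_kalU]; rw [fw28, get_tok16]; decide
  by_cases h29 : provinsi = "KALIMANTAN SELATAN"
  · subst h29; unfold get_pulau get_pulau_alt; simp only [up_sumU, up_jawU, up_sulU, up_papU, up_kalU]; rw [fw29, get_tok17]; decide
  by_cases h30 : provinsi = "KALIMANTAN TENGAH"
  · subst h30; unfold get_pulau get_pulau_alt; simp only [up_sumU, up_jawU, up_sulU, up_papU, up_kalU]; rw [fw30, get_tok17]; decide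
  by_cases h31 : provinsi = "KALIMANTAN BARAT"
  · subst h31; unfold get_pulau get_pulau_alt; simp only [up_sumU, up_jawU, up_sulU, up_papU, up_kalU]; rw [fw31, get_tok17]; decide
  by_cases h32 : provinsi = "KALIMANTAN TIMUR"
  · subst h32; unfold get_pulau get_pulau_alt; simp only [up_sumU, up_jawU, up_sulU, up_papU, up_kalU]; rw [fw32, get_tok17]; decide
  by_cases h33 : provinsi = "KALIMANTAN UTARA"
  · subst h33; unfold get_pulau get_pulau_alt; simp only [up_sumU, up_jawU, up_sulU, up_papU, up_kalU]; rw [fw33, get_tok17]; decide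
  have b0 : (provinsi == "SUMATERA UTARA") = false := beq_eq_false_iff_ne.mpr h0
  have c0 : ("SUMATERA UTARA" == provinsi) = false := beq_eq_false_iff_ne.mpr (Ne.symm h0)
  have b1 : (provinsi == "ACEH") = false := beq_eq_false_iff_ne.mpr h1
  have c1 : ("ACEH" == provinsi) = false := beq_eq_false_iff_ne.mpr (Ne.symm h1)
  have b2 : (provinsi == "LAMPUNG") = false := beq_eq_false_iff_ne.mpr h2
  have c2 : ("LAMPUNG" == provinsi) = false := beq_eq_false_iff_ne.mpr (Ne.symm h2)
  have b3 : (provinsi == "RIAU") = false := beq_eq_false_iff_ne.mpr h3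
  have c3 : ("RIAU" == provinsi) = false := beq_eq_false_iff_ne.mpr (Ne.symm h3)
  have b4 : (provinsi == "SUMATERA SELATAN") = false := beq_eq_false_iff_ne.mpr h4
  have c4 : ("SUMATERA SELATAN" == provinsi) = false := beq_eq_false_iff_ne.mpr (Ne.symm h4)
  have b5 : (provinsi == "KEP. RIAU") = false := beq_eq_false_iff_ne.mpr h5
  have c5 : ("KEP. RIAU" == provinsi) = false := beq_eq_false_iff_ne.mpr (Ne.symm h5)
  have b6 : (provinsi == "SUMATERA BARAT") = false := beq_eq_false_iff_ne.mpr h6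
  have c6 : ("SUMATERA BARAT" == provinsi) = false := beq_eq_false_iff_ne.mpr (Ne.symm h6)
  have b7 : (provinsi == "JAMBI") = false := beq_eq_false_iff_ne.mpr h7
  have c7 : ("JAMBI" == provinsi) = false := beq_eq_false_iff_ne.mpr (Ne.symm h7)
  have b8 : (provinsi == "BENGKULU") = false := beq_eq_false_iff_ne.mpr h8
  have c8 : ("BENGKULU" == provinsi) = false := beq_eq_false_iff_ne.mpr (Ne.symm h8)
  have b9 : (provinsi == "KEP. BANGKA BELITUNG") = false := beq_eq_false_iff_ne.mpr h9
  have c9 : ("KEP. BANGKA BELITUNG" == provinsi) = false := beq_eq_false_iff_ne.mpr (Ne.symm h9)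
  have b10 : (provinsi == "DKI JAKARTA") = false := beq_eq_false_iff_ne.mpr h10
  have c10 : ("DKI JAKARTA" == provinsi) = false := beq_eq_false_iff_ne.mpr (Ne.symm h10)
  have b11 : (provinsi == "DI YOGYAKARTA") = false := beq_eq_false_iff_ne.mpr h11
  have c11 : ("DI YOGYAKARTA" == provinsi) = false := beq_eq_false_iff_ne.mpr (Ne.symm h11)
  have b12 : (provinsi == "BANTEN") = false := beq_eq_false_iff_ne.mpr h12
  have c12 : ("BANTEN" == provinsi) = false := beq_eq_false_iff_ne.mpr (Ne.symm h12)
  have b13 : (provinsi == "JAWA TENGAH") = false := beq_eq_false_iff_ne.mpr h13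
  have c13 : ("JAWA TENGAH" == provinsi) = false := beq_eq_false_iff_ne.mpr (Ne.symm h13)
  have b14 : (provinsi == "NUSA TENGGARA TIMUR") = false := beq_eq_false_iff_ne.mpr h14
  have c14 : ("NUSA TENGGARA TIMUR" == provinsi) = false := beq_eq_false_iff_ne.mpr (Ne.symm h14)
  have b15 : (provinsi == "NUSA TENGGARA BARAT") = false := beq_eq_false_iff_ne.mpr h15
  have c15 : ("NUSA TENGGARA BARAT" == provinsi) = false := beq_eq_false_iff_ne.mpr (Ne.symm h15)
  have b16 : (provinsi == "JAWA BARAT") = false := beq_eq_false_iff_ne.mpr h16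
  have c16 : ("JAWA BARAT" == provinsi) = false := beq_eq_false_iff_ne.mpr (Ne.symm h16)
  have b17 : (provinsi == "JAWA TIMUR") = false := beq_eq_false_iff_ne.mpr h17
  have c17 : ("JAWA TIMUR" == provinsi) = false := beq_eq_false_iff_ne.mpr (Ne.symm h17)
  have b18 : (provinsi == "BALI") = false := beq_eq_false_iff_ne.mpr h18
  have c18 : ("BALI" == provinsi) = false := beq_eq_false_iff_ne.mpr (Ne.symm h18)
  have b19 : (provinsi == "SULAWESI TENGGARA") = false := beq_eq_false_iff_ne.mpr h19
  have c19 : ("SULAWESI TENGGARA" == provinsi) = false := beq_eq_false_iff_ne.mpr (Ne.symm h19)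
  have b20 : (provinsi == "GORONTALO") = false := beq_eq_false_iff_ne.mpr h20
  have c20 : ("GORONTALO" == provinsi) = false := beq_eq_false_iff_ne.mpr (Ne.symm h20)
  have b21 : (provinsi == "SULAWESI BARAT") = false := beq_eq_false_iff_ne.mpr h21
  have c21 : ("SULAWESI BARAT" == provinsi) = false := beq_eq_false_iff_ne.mpr (Ne.symm h21)
  have b22 : (provinsi == "SULAWESI SELATAN") = false := beq_eq_false_iff_ne.mpr h22
  have c22 : ("SULAWESI SELATAN" == provinsi) = false := beq_eq_false_iff_ne.mpr (Ne.symm h22)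
  have b23 : (provinsi == "SULAWESI UTARA") = false := beq_eq_false_iff_ne.mpr h23
  have c23 : ("SULAWESI UTARA" == provinsi) = false := beq_eq_false_iff_ne.mpr (Ne.symm h23)
  have b24 : (provinsi == "SULAWESI TENGAH") = false := beq_eq_false_iff_ne.mpr h24
  have c24 : ("SULAWESI TENGAH" == provinsi) = false := beq_eq_false_iff_ne.mpr (Ne.symm h24)
  have b25 : (provinsi == "MALUKU") = false := beq_eq_false_iff_ne.mpr h25
  have c25 : ("MALUKU" == provinsi) = false := beq_eq_false_iff_ne.mpr (Ne.symm h25)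
  have b26 : (provinsi == "PAPUA") = false := beq_eq_false_iff_ne.mpr h26
  have c26 : ("PAPUA" == provinsi) = false := beq_eq_false_iff_ne.mpr (Ne.symm h26)
  have b27 : (provinsi == "MALUKU UTARA") = false := beq_eq_false_iff_ne.mpr h27
  have c27 : ("MALUKU UTARA" == provinsi) = false := beq_eq_false_iff_ne.mpr (Ne.symm h27)
  have b28 : (provinsi == "PAPUA BARAT") = false := beq_eq_false_iff_ne.mpr h28
  have c28 : ("PAPUA BARAT" == provinsi) = false := beq_eq_false_iff_ne.mpr (Ne.symm h28)
  have b29 : (provinsi == "KALIMANTAN SELATAN") = false := beq_eq_false_iff_ne.mpr h29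
  have c29 : ("KALIMANTAN SELATAN" == provinsi) = false := beq_eq_false_iff_ne.mpr (Ne.symm h29)
  have b30 : (provinsi == "KALIMANTAN TENGAH") = false := beq_eq_false_iff_ne.mpr h30
  have c30 : ("KALIMANTAN TENGAH" == provinsi) = false := beq_eq_false_iff_ne.mpr (Ne.symm h30)
  have b31 : (provinsi == "KALIMANTAN BARAT") = false := beq_eq_false_iff_ne.mpr h31
  have c31 : ("KALIMANTAN BARAT" == provinsi) = false := beq_eq_false_iff_ne.mpr (Ne.symm h31)
  have b32 : (provinsi == "KALIMANTAN TIMUR") = false := beq_eq_false_iff_ne.mpr h32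
  have c32 : ("KALIMANTAN TIMUR" == provinsi) = false := beq_eq_false_iff_ne.mpr (Ne.symm h32)
  have b33 : (provinsi == "KALIMANTAN UTARA") = false := beq_eq_false_iff_ne.mpr h33
  have c33 : ("KALIMANTAN UTARA" == provinsi) = false := beq_eq_false_iff_ne.mpr (Ne.symm h33)
  have hA : get_pulau provinsi = "Tidak masuk" := by
    simp only [get_pulau, up_sumU, up_jawU, up_sulU, up_papU, up_kalU, sumU, jawU, sulU, papU, kalU,
        List.contains_cons, List.contains_nil, b0, c0, b1, c1, b2, c2, b3, c3, b4, c4, b5, c5, b6, c6, b7, c7, b8, c8, b9, c9, b10, c10, b11, c11, b12, c12, b13, c13, b14, c14, b15, c15, b16, c16, b17, c17, b18, c18, b19, c19, b20, c20, b21, c21, b22, c22, b23, c23, b24, c24, b25, c25, b26, c26, b27, c27, b28, c28, b29, c29, b30, c30, b31, c31, b32, c32, b33, c33,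
        Bool.or_false, Bool.false_eq_true, if_false]
  have hB : get_pulau_alt provinsi = "Tidak masuk" := by
      unfold get_pulau_alt
      by_cases t0 : firstWord provinsi = "SUMATERA"
      · rw [t0, get_tok0]
        simp only [sumU, List.contains_cons, List.contains_nil, b0, c0, b1, c1, b2, c2, b3, c3, b4, c4, b5, c5, b6, c6, b7, c7, b8, c8, b9, c9, b10, c10, b11, c11, b12, c12, b13, c13, b14, c14, b15, c15, b16, c16, b17, c17, b18, c18, b19, c19, b20, c20, b21, c21, b22, c22, b23, c23, b24, c24, b25, c25, b26, c26, b27, c27, b28, c28, b29, c29, b30, c30, b31, c31, b32, c32, b33, c33, Bool.or_false, Bool.false_eq_true, if_false]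
      by_cases t1 : firstWord provinsi = "ACEH"
      · rw [t1, get_tok1]
        simp only [sumU, List.contains_cons, List.contains_nil, b0, c0, b1, c1, b2, c2, b3, c3, b4, c4, b5, c5, b6, c6, b7, c7, b8, c8, b9, c9, b10, c10, b11, c11, b12, c12, b13, c13, b14, c14, b15, c15, b16, c16, b17, c17, b18, c18, b19, c19, b20, c20, b21, c21, b22, c22, b23, c23, b24, c24, b25, c25, b26, c26, b27, c27, b28, c28, b29, c29, b30, c30, b31, c31, b32, c32, b33, c33, Bool.or_false, Bool.false_eq_true, if_false]
      by_cases t2 : firstWord provinsi = "LAMPUNG"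
      · rw [t2, get_tok2]
        simp only [sumU, List.contains_cons, List.contains_nil, b0, c0, b1, c1, b2, c2, b3, c3, b4, c4, b5, c5, b6, c6, b7, c7, b8, c8, b9, c9, b10, c10, b11, c11, b12, c12, b13, c13, b14, c14, b15, c15, b16, c16, b17, c17, b18, c18, b19, c19, b20, c20, b21, c21, b22, c22, b23, c23, b24, c24, b25, c25, b26, c26, b27, c27, b28, c28, b29, c29, b30, c30, b31, c31, b32, c32, b33, c33, Bool.or_false, Bool.false_eq_true, if_false]
      by_cases t3 : firstWord provinsi = "RIAU"
      · rw [t3, get_tok3]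
        simp only [sumU, List.contains_cons, List.contains_nil, b0, c0, b1, c1, b2, c2, b3, c3, b4, c4, b5, c5, b6, c6, b7, c7, b8, c8, b9, c9, b10, c10, b11, c11, b12, c12, b13, c13, b14, c14, b15, c15, b16, c16, b17, c17, b18, c18, b19, c19, b20, c20, b21, c21, b22, c22, b23, c23, b24, c24, b25, c25, b26, c26, b27, c27, b28, c28, b29, c29, b30, c30, b31, c31, b32, c32, b33, c33, Bool.or_false, Bool.false_eq_true, if_false]
      by_cases t4 : firstWord provinsi = "KEP."
      · rw [t4, get_tok4]
        simp only [sumU, List.contains_cons, List.contains_nil, b0, c0, b1, c1, b2, c2, b3, c3, b4, c4, b5, c5, b6, c6, b7, c7, b8, c8, b9, c9, b10, c10, b11, c11, b12, c12, b13, c13, b14, c14, b15, c15, b16, c16, b17, c17, b18, c18, b19, c19, b20, c20, b21, c21, b22, c22, b23, c23, b24, c24, b25, c25, b26, c26, b27, c27, b28, c28, b29, c29, b30, c30, b31, c31, b32, c32, b33, c33, Bool.or_false, Bool.false_eq_true, if_false]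
      by_cases t5 : firstWord provinsi = "JAMBI"
      · rw [t5, get_tok5]
        simp only [sumU, List.contains_cons, List.contains_nil, b0, c0, b1, c1, b2, c2, b3, c3, b4, c4, b5, c5, b6, c6, b7, c7, b8, c8, b9, c9, b10, c10, b11, c11, b12, c12, b13, c13, b14, c14, b15, c15, b16, c16, b17, c17, b18, c18, b19, c19, b20, c20, b21, c21, b22, c22, b23, c23, b24, c24, b25, c25, b26, c26, b27, c27, b28, c28, b29, c29, b30, c30, b31, c31, b32, c32, b33, c33, Bool.or_false, Bool.false_eq_true, if_false]
      by_cases t6 : firstWord provinsi = "BENGKULU"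
      · rw [t6, get_tok6]
        simp only [sumU, List.contains_cons, List.contains_nil, b0, c0, b1, c1, b2, c2, b3, c3, b4, c4, b5, c5, b6, c6, b7, c7, b8, c8, b9, c9, b10, c10, b11, c11, b12, c12, b13, c13, b14, c14, b15, c15, b16, c16, b17, c17, b18, c18, b19, c19, b20, c20, b21, c21, b22, c22, b23, c23, b24, c24, b25, c25, b26, c26, b27, c27, b28, c28, b29, c29, b30, c30, b31, c31, b32, c32, b33, c33, Bool.or_false, Bool.false_eq_true, if_false]
      by_cases t7 : firstWord provinsi = "DKI"
      · rw [t7, get_tok7]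
        simp only [jawU, List.contains_cons, List.contains_nil, b0, c0, b1, c1, b2, c2, b3, c3, b4, c4, b5, c5, b6, c6, b7, c7, b8, c8, b9, c9, b10, c10, b11, c11, b12, c12, b13, c13, b14, c14, b15, c15, b16, c16, b17, c17, b18, c18, b19, c19, b20, c20, b21, c21, b22, c22, b23, c23, b24, c24, b25, c25, b26, c26, b27, c27, b28, c28, b29, c29, b30, c30, b31, c31, b32, c32, b33, c33, Bool.or_false, Bool.false_eq_true, if_false]
      by_cases t8 : firstWord provinsi = "DI"
      · rw [t8, get_tok8]
        simp only [jawU, List.contains_cons, List.contains_nil, b0, c0, b1, c1, b2, c2, b3, c3, b4, c4, b5, c5, b6, c6, b7, c7, b8, c8, b9, c9, b10, c10, b11, c11, b12, c12, b13, c13, b14, c14, b15, c15, b16, c16, b17, c17, b18, c18, b19, c19, b20, c20, b21, c21, b22, c22, b23, c23, b24, c24, b25, c25, b26, c26, b27, c27, b28, c28, b29, c29, b30, c30, b31, c31, b32, c32, b33, c33, Bool.or_false, Bool.false_eq_true, if_false]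
      by_cases t9 : firstWord provinsi = "BANTEN"
      · rw [t9, get_tok9]
        simp only [jawU, List.contains_cons, List.contains_nil, b0, c0, b1, c1, b2, c2, b3, c3, b4, c4, b5, c5, b6, c6, b7, c7, b8, c8, b9, c9, b10, c10, b11, c11, b12, c12, b13, c13, b14, c14, b15, c15, b16, c16, b17, c17, b18, c18, b19, c19, b20, c20, b21, c21, b22, c22, b23, c23, b24, c24, b25, c25, b26, c26, b27, c27, b28, c28, b29, c29, b30, c30, b31, c31, b32, c32, b33, c33, Bool.or_false, Bool.false_eq_true, if_false]
      by_cases t10 : firstWord provinsi = "JAWA"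
      · rw [t10, get_tok10]
        simp only [jawU, List.contains_cons, List.contains_nil, b0, c0, b1, c1, b2, c2, b3, c3, b4, c4, b5, c5, b6, c6, b7, c7, b8, c8, b9, c9, b10, c10, b11, c11, b12, c12, b13, c13, b14, c14, b15, c15, b16, c16, b17, c17, b18, c18, b19, c19, b20, c20, b21, c21, b22, c22, b23, c23, b24, c24, b25, c25, b26, c26, b27, c27, b28, c28, b29, c29, b30, c30, b31, c31, b32, c32, b33, c33, Bool.or_false, Bool.false_eq_true, if_false]
      by_cases t11 : firstWord provinsi = "NUSA"
      · rw [t11, get_tok11]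
        simp only [jawU, List.contains_cons, List.contains_nil, b0, c0, b1, c1, b2, c2, b3, c3, b4, c4, b5, c5, b6, c6, b7, c7, b8, c8, b9, c9, b10, c10, b11, c11, b12, c12, b13, c13, b14, c14, b15, c15, b16, c16, b17, c17, b18, c18, b19, c19, b20, c20, b21, c21, b22, c22, b23, c23, b24, c24, b25, c25, b26, c26, b27, c27, b28, c28, b29, c29, b30, c30, b31, c31, b32, c32, b33, c33, Bool.or_false, Bool.false_eq_true, if_false]
      by_cases t12 : firstWord provinsi = "BALI"
      · rw [t12, get_tok12]
        simp only [jawU, List.contains_cons, List.contains_nil, b0, c0, b1, c1, b2, c2, b3, c3, b4, c4, b5, c5, b6, c6, b7, c7, b8, c8, b9, c9, b10, c10, b11, c11, b12, c12, b13, c13, b14, c14, b15, c15, b16, c16, b17, c17, b18, c18, b19, c19, b20, c20, b21, c21, b22, c22, b23, c23, b24, c24, b25, c25, b26, c26, b27, c27, b28, c28, b29, c29, b30, c30, b31, c31, b32, c32, b33, c33, Bool.or_false, Bool.false_eq_true, if_false]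
      by_cases t13 : firstWord provinsi = "SULAWESI"
      · rw [t13, get_tok13]
        simp only [sulU, List.contains_cons, List.contains_nil, b0, c0, b1, c1, b2, c2, b3, c3, b4, c4, b5, c5, b6, c6, b7, c7, b8, c8, b9, c9, b10, c10, b11, c11, b12, c12, b13, c13, b14, c14, b15, c15, b16, c16, b17, c17, b18, c18, b19, c19, b20, c20, b21, c21, b22, c22, b23, c23, b24, c24, b25, c25, b26, c26, b27, c27, b28, c28, b29, c29, b30, c30, b31, c31, b32, c32, b33, c33, Bool.or_false, Bool.false_eq_true, if_false]
      by_cases t14 : firstWord provinsi = "GORONTALO"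
      · rw [t14, get_tok14]
        simp only [sulU, List.contains_cons, List.contains_nil, b0, c0, b1, c1, b2, c2, b3, c3, b4, c4, b5, c5, b6, c6, b7, c7, b8, c8, b9, c9, b10, c10, b11, c11, b12, c12, b13, c13, b14, c14, b15, c15, b16, c16, b17, c17, b18, c18, b19, c19, b20, c20, b21, c21, b22, c22, b23, c23, b24, c24, b25, c25, b26, c26, b27, c27, b28, c28, b29, c29, b30, c30, b31, c31, b32, c32, b33, c33, Bool.or_false, Bool.false_eq_true, if_false]
      by_cases t15 : firstWord provinsi = "MALUKU"
      · rw [t15, get_tok15]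
        simp only [papU, List.contains_cons, List.contains_nil, b0, c0, b1, c1, b2, c2, b3, c3, b4, c4, b5, c5, b6, c6, b7, c7, b8, c8, b9, c9, b10, c10, b11, c11, b12, c12, b13, c13, b14, c14, b15, c15, b16, c16, b17, c17, b18, c18, b19, c19, b20, c20, b21, c21, b22, c22, b23, c23, b24, c24, b25, c25, b26, c26, b27, c27, b28, c28, b29, c29, b30, c30, b31, c31, b32, c32, b33, c33, Bool.or_false, Bool.false_eq_true, if_false]
      by_cases t16 : firstWord provinsi = "PAPUA"
      · rw [t16, get_tok16]
        simp only [papU, List.contains_cons, List.contains_nil, b0, c0, b1, c1, b2, c2, b3, c3, b4, c4, b5, c5, b6, c6, b7, c7, b8, c8, b9, c9, b10, c10, b11, c11, b12, c12, b13, c13, b14, c14, b15, c15, b16, c16, b17, c17, b18, c18, b19, c19, b20, c20, b21, c21, b22, c22, b23, c23, b24, c24, b25, c25, b26, c26, b27, c27, b28, c28, b29, c29, b30, c30, b31, c31, b32, c32, b33, c33, Bool.or_false, Bool.false_eq_true, if_false]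
      by_cases t17 : firstWord provinsi = "KALIMANTAN"
      · rw [t17, get_tok17]
        simp only [kalU, List.contains_cons, List.contains_nil, b0, c0, b1, c1, b2, c2, b3, c3, b4, c4, b5, c5, b6, c6, b7, c7, b8, c8, b9, c9, b10, c10, b11, c11, b12, c12, b13, c13, b14, c14, b15, c15, b16, c16, b17, c17, b18, c18, b19, c19, b20, c20, b21, c21, b22, c22, b23, c23, b24, c24, b25, c25, b26, c26, b27, c27, b28, c28, b29, c29, b30, c30, b31, c31, b32, c32, b33, c33, Bool.or_false, Bool.false_eq_true, if_false]
      rw [byFirstWord_unfold]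
      simp [PySem.Dict.get?_insert, t0, t1, t2, t3, t4, t5, t6, t7, t8, t9, t10, t11, t12, t13, t14, t15, t16, t17]
      try simp [PySem.Dict.get?]
  rw [hA, hB]
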